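-- pv_equiv track=rewrite | github.com/Hyojeong721/TIL | SWA/0930/gudtjs0428/10726_이진수표현/s1.py | if_all_1
-- ===== SOURCE A (Python) =====
-- def if_all_1(N, M):
--     bina = ''
--     while M:
--         if M % 2:
--             bina = '1' + bina
--         else:
--             bina = '0' + bina
--         M //= 2
--
--     if N > len(bina):
--         return 'OFF'
--     if bina[:-N-1:-1] == '1' * N:
--         return 'ON'
--     return 'OFF'
-- ===== SOURCE B (Python) =====
-- def if_all_1(N, M):
--     mask = (1 << N) - 1
--     return 'ON' if M & mask == mask else 'OFF'
-- ===== Notes on version B (the rewrite author's own statement) =====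
-- stated objective: simpler
-- what changed: Drops the binary-string-building while loop and reversed-slice comparison entirely; tests the lowest N bits directly with a single bitmask check (M & ((1<<N)-1)) == (1<<N)-1.
-- outside the precondition, e.g. on if_all_1(-1, 0): A returns 'ON', B raises ValueError; on if_all_1(-2, 5): A returns 'OFF', B raises ValueError; on if_all_1(2, -1): A does not finish within the time limit, B returns 'ON'
import Mathlib
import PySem

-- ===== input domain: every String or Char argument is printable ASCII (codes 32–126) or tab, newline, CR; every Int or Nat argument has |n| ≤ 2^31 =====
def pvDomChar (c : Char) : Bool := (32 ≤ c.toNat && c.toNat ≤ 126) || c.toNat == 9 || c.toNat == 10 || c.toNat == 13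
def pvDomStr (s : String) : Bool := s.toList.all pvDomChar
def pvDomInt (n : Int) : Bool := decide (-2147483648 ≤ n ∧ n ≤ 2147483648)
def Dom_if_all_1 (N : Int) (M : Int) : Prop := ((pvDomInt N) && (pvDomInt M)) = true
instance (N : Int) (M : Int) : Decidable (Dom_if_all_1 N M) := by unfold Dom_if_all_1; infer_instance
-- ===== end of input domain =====

-- B replaces A's binary-string-building loop + reversed-slice comparison with one bitmask test (simpler).


-- ===== PORT A =====
-- the 'while M:' loop; fuel is only a totality guard (M.natAbs + 1 steps suffice for every M ≥ 0,
-- the inputs on which the Python loop terminates)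
def if_all_1_loop : Nat → Int → List Char → List Char
  | 0, _, bina => bina
  | fuel+1, M, bina =>
    if M ≠ 0 then
      if_all_1_loop fuel (PySem.Int.floordiv M 2)
        ((if PySem.Int.mod M 2 ≠ 0 then ['1'] else ['0']) ++ bina)
    else bina

-- strings of binary digits are carried as List Char (exact: all chars are ASCII '0'/'1');
-- '1' * N is List.replicate N.toNat '1' (Python string repetition, empty for N < 0)
def if_all_1 (N : Int) (M : Int) : String :=
  let bina := if_all_1_loop (M.natAbs + 1) M []
  if N > (bina.length : Int) then "OFF"
  else if PySem.List.slice? bina none (some (-N - 1)) (-1) = some (List.replicate N.toNat '1') then "ON"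
  else "OFF"

-- ===== PORT B =====
-- mask = (1 << N) - 1; N ≥ 0 inside Pre_ (Python raises ValueError on a negative shift)
def if_all_1_alt (N : Int) (M : Int) : String :=
  let mask : Int := 2 ^ N.toNat - 1
  if PySem.Int.band M mask = mask then "ON" else "OFF"

-- ===== PRECONDITION & SPEC =====
-- Pre_ excludes M < 0, where A's 'while M:' loop never terminates, and N < 0, where A returns a value
-- only by accident of Python's negative-slice clamping while B's left shift (1 << N) raises ValueError.
def Pre_if_all_1 (N : Int) (M : Int) : Prop := 0 ≤ N ∧ 0 ≤ M
instance (N : Int) (M : Int) : Decidable (Pre_if_all_1 N M) := by unfold Pre_if_all_1; infer_instance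
def pvWitness_if_all_1 : Int × Int := (3, 7)

def Spec_if_all_1 (N : Int) (M : Int) (out : String) : Prop := out = if_all_1_alt N M
instance (N : Int) (M : Int) (out : String) : Decidable (Spec_if_all_1 N M out) := by unfold Spec_if_all_1; infer_instance

-- ===== CLAIM (what is proved, stated in full; the proofs are below) =====
def Claim_equal_if_all_1 : Prop := ∀ (N : Int) (M : Int), Dom_if_all_1 N M → Pre_if_all_1 N M → Spec_if_all_1 N M (if_all_1 N M)

-- ===== LEMMAS AND PROOFS =====

-- the binary digits of m, most significant first (what A's loop builds)
def pvBits (m : Nat) : List Char :=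
  if _h : m = 0 then []
  else pvBits (m / 2) ++ [if m % 2 = 1 then '1' else '0']
  termination_by m
  decreasing_by exact Nat.div_lt_self (by omega) (by omega)

lemma pvLoop_eq : ∀ (fuel m : Nat) (acc : List Char), m < fuel →
    if_all_1_loop fuel (m : Int) acc = pvBits m ++ acc := by
  intro fuel
  induction fuel with
  | zero => intro m acc h; omega
  | succ fuel ih =>
    intro m acc h
    by_cases hm : m = 0
    · subst hm
      simp [if_all_1_loop, pvBits]
    · have hmpos : 0 < m := by omega
      have h2 : PySem.Int.floordiv (m : Int) 2 = ((m / 2 : Nat) : Int) :=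
        PySem.Int.floordiv_natCast m 2
      have h3 : PySem.Int.mod (m : Int) 2 = ((m % 2 : Nat) : Int) :=
        PySem.Int.mod_natCast m 2
      have hstep : m / 2 < fuel := by
        have h' : m / 2 < m := Nat.div_lt_self hmpos one_lt_two
        omega
      rw [show if_all_1_loop (fuel + 1) (m : Int) acc =
            if (m : Int) ≠ 0 then
              if_all_1_loop fuel (PySem.Int.floordiv (m : Int) 2)
                ((if PySem.Int.mod (m : Int) 2 ≠ 0 then ['1'] else ['0']) ++ acc)
            else acc from rfl]
      rw [if_pos (by exact_mod_cast hm), h2, h3, ih _ _ hstep]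
      rw [show pvBits m = pvBits (m / 2) ++ [if m % 2 = 1 then '1' else '0'] from by
            rw [pvBits]; simp [hm]]
      by_cases hr : m % 2 = 1
      · have hc1 : ((m % 2 : Nat) : Int) ≠ 0 := by omega
        rw [if_pos hc1, if_pos hr]; simp
      · have hc0 : ¬ ((m % 2 : Nat) : Int) ≠ 0 := by omega
        rw [if_neg hc0, if_neg hr]; simp

lemma pvBits_lt (m : Nat) : m < 2 ^ (pvBits m).length := by
  induction m using Nat.strong_induction_on with
  | _ m ih =>
    by_cases hm : m = 0
    · subst hm; simp [pvBits]
    · rw [pvBits, dif_neg hm]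
      have ih2 := ih (m / 2) (Nat.div_lt_self (by omega) (by omega))
      have hlen : (pvBits (m / 2) ++ [if m % 2 = 1 then '1' else '0']).length
          = (pvBits (m / 2)).length + 1 := by simp
      rw [hlen, pow_succ]
      omega

lemma pvFilterMap_getElem (ys : List Char) : ∀ (n : Nat), n ≤ ys.length →
    (List.range n).filterMap (fun k => ys[k]?) = ys.take n := by
  intro n
  induction n with
  | zero => intro _; simp
  | succ n ih =>
    intro h
    rw [List.range_succ, List.filterMap_append, ih (by omega)]
    have hn : n < ys.length := by omega
    have h1 : List.filterMap (fun k => ys[k]?) [n] = [ys[n]'hn] := by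
      simp [List.getElem?_eq_getElem hn]
    rw [h1, List.take_add_one, List.getElem?_eq_getElem hn]
    simp

lemma pvSlice_rev_take (xs : List Char) (n : Nat) (h : n ≤ xs.length) :
    PySem.List.slice? xs none (some (-(n : Int) - 1)) (-1) = some (xs.reverse.take n) := by
  rw [PySem.List.slice?, PySem.List.sliceIndices]
  norm_num
  have h1 : (-(n : Int) < 1) := by omega
  rw [if_pos h1]
  have h2 : max (-(n : Int) - 1 + (xs.length : Int)) (-1) = (xs.length : Int) - n - 1 := by omega
  rw [h2]
  by_cases hn : n = 0
  · subst hn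
    rw [if_neg (by omega)]
    simp
  · rw [if_pos (by omega)]
    have h3 : ((xs.length : Int) - 1 - ((xs.length : Int) - n - 1)).toNat = n := by omega
    rw [h3]
    have hcg : ∀ k ∈ List.range n,
        (xs[((xs.length : Int) - 1 + -(k : Int)).toNat]?) = xs.reverse[k]? := by
      intro k hk
      have hkn : k < n := List.mem_range.mp hk
      have hik : ((xs.length : Int) - 1 + -(k : Int)).toNat = xs.length - 1 - k := by omega
      have hlt : xs.length - 1 - k < xs.length := by omega
      have hlt2 : k < xs.reverse.length := by simp; omega
      rw [hik, List.getElem?_eq_getElem hlt, List.getElem?_eq_getElem hlt2]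
      rw [List.getElem_reverse]
    rw [List.filterMap_congr hcg]
    exact pvFilterMap_getElem xs.reverse n (by simp; omega)

-- A's ON-condition on the bits ↔ the arithmetic condition
lemma pvKey : ∀ (n m : Nat),
    (n ≤ (pvBits m).length ∧ (pvBits m).reverse.take n = List.replicate n '1')
      ↔ m % 2 ^ n = 2 ^ n - 1 := by
  intro n
  induction n with
  | zero => intro m; simp [Nat.mod_one]
  | succ n ih =>
    intro m
    by_cases hm : m = 0
    · subst hm
      simp [pvBits]
      have : 0 < 2 ^ (n + 1) := by positivity
      omega
    · have hbits : pvBits m = pvBits (m / 2) ++ [if m % 2 = 1 then '1' else '0'] := by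
        rw [pvBits]; simp [hm]
      have hsplit : m % 2 ^ (n + 1) = m % 2 + 2 * (m / 2 % 2 ^ n) := by
        have hmm : m % (2 * 2 ^ n) = m % 2 + 2 * (m / 2 % 2 ^ n) := Nat.mod_mul
        rw [pow_succ, mul_comm]
        exact hmm
      have hP : 0 < 2 ^ n := by positivity
      have hq : m / 2 % 2 ^ n < 2 ^ n := Nat.mod_lt _ hP
      have hr : m % 2 < 2 := Nat.mod_lt _ (by omega)
      constructor
      · rintro ⟨h1, h2⟩
        rw [hbits] at h1 h2
        simp only [List.reverse_append, List.reverse_cons, List.reverse_nil,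
          List.nil_append, List.cons_append,
          List.take_succ_cons, List.replicate_succ, List.length_append,
          List.length_cons, List.length_nil] at h1 h2
        obtain ⟨hc, htl⟩ := List.cons_eq_cons.mp h2
        have hbit : m % 2 = 1 := by
          by_contra hb
          rw [if_neg hb] at hc
          exact absurd hc (by decide)
        have := (ih (m / 2)).mp ⟨by omega, htl⟩
        rw [hsplit, hbit, this]
        have h2n : 2 ^ (n + 1) = 2 * 2 ^ n := by ring
        omega
      · intro hmod
        rw [hsplit] at hmod
        have h2n : 2 ^ (n + 1) = 2 * 2 ^ n := by ring
        have hbit : m % 2 = 1 := by omega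
        have hq' : m / 2 % 2 ^ n = 2 ^ n - 1 := by omega
        obtain ⟨h1, h2⟩ := (ih (m / 2)).mpr hq'
        rw [hbits]
        constructor
        · simp only [List.length_append, List.length_cons, List.length_nil]; omega
        · simp only [List.reverse_append, List.reverse_cons, List.reverse_nil,
            List.nil_append, List.cons_append, List.take_succ_cons,
            List.replicate_succ, hbit]
          simp [h2]

-- B's condition as arithmetic
lemma pvBand (m n : Nat) :
    (PySem.Int.band (m : Int) ((2 : Int) ^ n - 1) = (2 : Int) ^ n - 1)
      ↔ m % 2 ^ n = 2 ^ n - 1 := by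
  have hpow : ((2 : Int) ^ n - 1) = (((2 ^ n - 1 : Nat)) : Int) := by
    have : (1 : Nat) ≤ 2 ^ n := Nat.one_le_two_pow
    push_cast [this]
    ring
  rw [hpow, PySem.Int.band_natCast, Nat.and_two_pow_sub_one_eq_mod]
  exact_mod_cast Iff.rfl

-- ===== VERDICT (by name: the statement is the Claim_ definition above) =====
theorem if_all_1_spec : Claim_equal_if_all_1 := by
  intro N M _ ⟨hN, hM⟩
  obtain ⟨n, rfl⟩ : ∃ n : Nat, N = (n : Int) := ⟨N.toNat, (Int.toNat_of_nonneg hN).symm⟩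
  obtain ⟨m, rfl⟩ : ∃ m : Nat, M = (m : Int) := ⟨M.toNat, (Int.toNat_of_nonneg hM).symm⟩
  show if_all_1 (n : Int) (m : Int) = if_all_1_alt (n : Int) (m : Int)
  have hbina : if_all_1_loop ((m : Int).natAbs + 1) (m : Int) [] = pvBits m := by
    rw [Int.natAbs_natCast, pvLoop_eq (m + 1) m [] (by omega)]
    simp
  have htoNat : ((n : Int)).toNat = n := Int.toNat_natCast n
  rw [if_all_1, if_all_1_alt]
  simp only [hbina, htoNat]
  rw [show (-(n : Int) - 1) = (-(n : Int) - 1) from rfl]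
  by_cases hlen : (n : Int) > ((pvBits m).length : Int)
  · rw [if_pos hlen]
    have hlen' : (pvBits m).length < n := by exact_mod_cast hlen
    have hml : m < 2 ^ (pvBits m).length := pvBits_lt m
    have hne : ¬ (m % 2 ^ n = 2 ^ n - 1) := by
      have hlt : 2 ^ (pvBits m).length < 2 ^ n :=
        Nat.pow_lt_pow_right (by omega) hlen'
      have : m % 2 ^ n = m := Nat.mod_eq_of_lt (by omega)
      omega
    rw [if_neg (fun hcontra => hne ((pvBand m n).mp hcontra))]
  · rw [if_neg hlen]
    have hlen' : n ≤ (pvBits m).length := by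
      have : ¬ ((pvBits m).length : Int) < (n : Int) := hlen
      exact_mod_cast not_lt.mp this
    rw [pvSlice_rev_take (pvBits m) n hlen']
    by_cases hcond : m % 2 ^ n = 2 ^ n - 1
    · have h2 := (pvKey n m).mpr hcond
      rw [if_pos (by rw [h2.2]), if_pos ((pvBand m n).mpr hcond)]
    · have h2 : ¬ ((pvBits m).reverse.take n = List.replicate n '1') := by
        intro he
        exact hcond ((pvKey n m).mp ⟨hlen', he⟩)
      rw [if_neg (by simpa using h2), if_neg (fun hc => hcond ((pvBand m n).mp hc))]
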